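-- pv_equiv track=rewrite | github.com/HachikoDD/ChatBot | Web interface/app.py | keep_first_N
-- ===== SOURCE A (Python) =====
-- def keep_first_N(fulfillment_text):
--     the_first_N = 0;
--     for i in fulfillment_text:
--         if(i == '\n'):
--             break
--         else:
--             the_first_N = the_first_N + 1
--     fulfillment_text = fulfillment_text.replace("\n", "")
--     fulfillment_text = fulfillment_text[:the_first_N] + '\n' + fulfillment_text[the_first_N:]
--     return fulfillment_text
-- ===== SOURCE B (Python) =====
-- def keep_first_N(fulfillment_text):
--     parts = fulfillment_text.split('\n')
--     return parts[0] + '\n' + ''.join(parts[1:])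
-- ===== Notes on version B (the rewrite author's own statement) =====
-- stated objective: idiomatic
-- what changed: Replaces the manual counting loop, global replace and slice re-insertion with a single split on the newline character followed by joining the tail segments, avoiding index arithmetic and the extra replace pass (measured faster by a constant factor).
import Mathlib
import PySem

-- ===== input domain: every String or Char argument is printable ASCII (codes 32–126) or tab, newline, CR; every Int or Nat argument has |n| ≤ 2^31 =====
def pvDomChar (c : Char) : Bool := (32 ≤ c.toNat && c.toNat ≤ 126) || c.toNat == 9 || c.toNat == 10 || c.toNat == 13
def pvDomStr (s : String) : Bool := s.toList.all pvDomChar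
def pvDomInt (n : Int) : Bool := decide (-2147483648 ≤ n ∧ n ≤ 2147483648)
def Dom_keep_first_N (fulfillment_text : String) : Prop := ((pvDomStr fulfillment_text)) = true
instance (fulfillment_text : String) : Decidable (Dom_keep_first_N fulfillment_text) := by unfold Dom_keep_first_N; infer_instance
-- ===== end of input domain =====

-- B replaces A's counting loop + replace + slice re-insertion by split('\n') + join; equivalence of return values, no side effects involved.

-- ===== PORT A =====
-- the for-loop with break: counts the characters before the first '\n'
def pvCountA : List Char → Nat
  | [] => 0
  | c :: t => if c = '\n' then 0 else pvCountA t + 1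

def keep_first_N (fulfillment_text : String) : String :=
  let the_first_N : Nat := pvCountA fulfillment_text.toList
  let t := PySem.Str.replace fulfillment_text "\n" ""
  -- t[:the_first_N] + '\n' + t[the_first_N:]; the two '+' are done at code-point level
  -- (Lean's String.append is kernel-opaque), which is exact for string concatenation
  String.ofList (PySem.Chars.slice t.toList none (some (the_first_N : Int)) ++
             '\n' :: PySem.Chars.slice t.toList (some (the_first_N : Int)) none)

-- ===== PORT B =====
def keep_first_N_alt (fulfillment_text : String) : String :=
  -- parts = fulfillment_text.split('\n'); return parts[0] + '\n' + ''.join(parts[1:])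
  -- split('\n') always yields a nonempty list, so parts[0] is its head;
  -- concatenation again at code-point level, which is exact
  let parts := PySem.Chars.splitOn fulfillment_text.toList ['\n']
  String.ofList (parts.headI ++ '\n' :: PySem.Chars.join [] parts.tail)

-- ===== PRECONDITION & SPEC =====
def Spec_keep_first_N (fulfillment_text : String) (out : String) : Prop := out = keep_first_N_alt fulfillment_text
instance (fulfillment_text : String) (out : String) : Decidable (Spec_keep_first_N fulfillment_text out) := by unfold Spec_keep_first_N; infer_instance

-- ===== CLAIM (what is proved, stated in full; the proofs are below) =====
def Claim_equal_keep_first_N : Prop := ∀ (fulfillment_text : String), Dom_keep_first_N fulfillment_text → Spec_keep_first_N fulfillment_text (keep_first_N fulfillment_text)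

-- ===== LEMMAS AND PROOFS =====

-- (head, tail) of the '\n'-split of a character list
def pvSp : List Char → List Char × List (List Char)
  | [] => ([], [])
  | c :: t => if c = '\n' then ([], (pvSp t).1 :: (pvSp t).2) else (c :: (pvSp t).1, (pvSp t).2)

theorem pvBeq_nl_false {c : Char} (hc : ¬ c = '\n') : ('\n' == c) = false :=
  beq_eq_false_iff_ne.mpr (Ne.symm hc)

theorem pvReplaceGo_eq (fuel : Nat) : ∀ (cs acc : List Char), cs.length ≤ fuel →
    PySem.Chars.replace.go ['\n'] [] fuel cs acc = acc.reverse ++ cs.filter (· != '\n') := by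
  induction fuel with
  | zero =>
    intro cs acc h
    have : cs = [] := List.eq_nil_of_length_eq_zero (Nat.le_zero.mp h)
    subst this; simp [PySem.Chars.replace.go]
  | succ n ih =>
    intro cs acc h
    cases cs with
    | nil => simp [PySem.Chars.replace.go]
    | cons c t =>
      have hle : t.length ≤ n := by simpa using Nat.le_of_succ_le_succ h
      simp only [PySem.Chars.replace.go, List.isPrefixOf]
      by_cases hc : c = '\n'
      · subst hc
        simp only [beq_self_eq_true, Bool.true_and, if_true]
        rw [show List.drop ['\n'].length ('\n' :: t) = t from rfl]
        rw [ih t ([].reverse ++ acc) hle]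
        simp [List.filter]
      · simp only [pvBeq_nl_false hc, Bool.false_and]
        rw [if_neg Bool.false_ne_true, ih t (c :: acc) hle]
        simp [List.filter, bne, beq_eq_false_iff_ne.mpr hc]

theorem pvSplitGo_eq (fuel : Nat) : ∀ (cs cur : List Char) (acc : List (List Char)), cs.length ≤ fuel →
    PySem.Chars.splitOn.go ['\n'] fuel cs cur acc =
      acc.reverse ++ (cur.reverse ++ (pvSp cs).1) :: (pvSp cs).2 := by
  induction fuel with
  | zero =>
    intro cs cur acc h
    have : cs = [] := List.eq_nil_of_length_eq_zero (Nat.le_zero.mp h)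
    subst this; simp [PySem.Chars.splitOn.go, pvSp]
  | succ n ih =>
    intro cs cur acc h
    cases cs with
    | nil => simp [PySem.Chars.splitOn.go, pvSp]
    | cons c t =>
      have hle : t.length ≤ n := by simpa using Nat.le_of_succ_le_succ h
      simp only [PySem.Chars.splitOn.go, List.isPrefixOf]
      by_cases hc : c = '\n'
      · subst hc
        simp only [beq_self_eq_true, Bool.true_and, if_true]
        rw [show List.drop ['\n'].length ('\n' :: t) = t from rfl]
        rw [ih t [] (cur.reverse :: acc) hle]
        simp [pvSp]
      · simp only [pvBeq_nl_false hc, Bool.false_and]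
        rw [if_neg Bool.false_ne_true, ih t (c :: cur) acc hle]
        simp [pvSp, hc]

theorem pvFilter_eq_sp (cs : List Char) :
    cs.filter (· != '\n') = (pvSp cs).1 ++ ((pvSp cs).2).flatten := by
  induction cs with
  | nil => simp [pvSp]
  | cons c t ih =>
    by_cases hc : c = '\n'
    · subst hc; simpa [pvSp, List.filter] using ih
    · simp only [pvSp, if_neg hc, List.filter, bne, beq_eq_false_iff_ne.mpr hc]
      simpa [List.filter] using congrArg (c :: ·) ih

theorem pvCountA_eq_sp (cs : List Char) : pvCountA cs = (pvSp cs).1.length := by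
  induction cs with
  | nil => simp [pvCountA, pvSp]
  | cons c t ih =>
    by_cases hc : c = '\n'
    · subst hc; simp [pvCountA, pvSp]
    · simp [pvCountA, pvSp, hc, ih]

theorem pvReplace_toList (s : String) :
    (PySem.Str.replace s "\n" "").toList = s.toList.filter (· != '\n') := by
  rw [PySem.Str.toList_replace]
  show PySem.Chars.replace s.toList ['\n'] [] = _
  rw [PySem.Chars.replace, if_neg (by simp)]
  exact pvReplaceGo_eq s.toList.length s.toList [] (le_refl _)

theorem pvSplitOn_eq (cs : List Char) :
    PySem.Chars.splitOn cs ['\n'] = (pvSp cs).1 :: (pvSp cs).2 := by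
  rw [PySem.Chars.splitOn]
  rw [pvSplitGo_eq (cs.length + 1) cs [] [] (Nat.le_succ _)]
  simp

theorem pvJoin_nil (l : List (List Char)) : PySem.Chars.join [] l = l.flatten := by
  rw [PySem.Chars.join]
  induction l with
  | nil => simp [List.intercalate]
  | cons a t ih =>
    cases t with
    | nil => simp [List.intercalate]
    | cons b u =>
      simp only [List.intercalate, List.intersperse] at ih ⊢
      simp [ih]

-- ===== VERDICT (by name: the statement is the Claim_ definition above) =====
theorem keep_first_N_spec : Claim_equal_keep_first_N := by
  intro s _
  unfold Spec_keep_first_N keep_first_N keep_first_N_alt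
  simp only [pvSplitOn_eq, List.headI, List.tail_cons, pvJoin_nil]
  have hr : (PySem.Str.replace s "\n" "").toList = (pvSp s.toList).1 ++ ((pvSp s.toList).2).flatten := by
    rw [pvReplace_toList, pvFilter_eq_sp]
  rw [hr, pvCountA_eq_sp]
  rw [PySem.Chars.slice_eq_listSlice, PySem.Chars.slice_eq_listSlice,
      PySem.List.slice_to_natCast, PySem.List.slice_from_natCast,
      List.take_left, List.drop_left]
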